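-- pv_equiv track=rewrite | github.com/plognjen/triton | python/triton/experimental/gluon/language/_layouts.py | bases_per_dim
-- ===== SOURCE A (Python) =====
-- def bases_per_dim(bases, rank, skip_broadcast=True):
--     result = [1] * rank
--
--     if not bases:
--         return result
--
--     non_zero_idx = None
--
--     for basis in bases:
--         # Find the first non-zero index in the current basis
--         idx = next((i for i, v in enumerate(basis) if v != 0), None)
--         if idx is not None:
--             non_zero_idx = idx
--             result[idx] *= 2
--         elif not skip_broadcast:
--             # If no non-zero found and we're not skipping broadcasts, use the last found non-zero index
--             assert non_zero_idx is not None
--             result[non_zero_idx] *= 2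
--
--     return result
-- ===== SOURCE B (Python) =====
-- def _first_nz(basis):
--     nz = [v for v in basis if v != 0]
--     return basis.index(nz[0]) if nz else None
--
--
-- def bases_per_dim(bases, rank, skip_broadcast=True):
--     firsts = [_first_nz(b) for b in bases]
--     if skip_broadcast:
--         idxs = [f for f in firsts if f is not None]
--     else:
--         assert not firsts or firsts[0] is not None
--         idxs = []
--         for f in firsts:
--             idxs.append(f if f is not None else idxs[-1])
--     return [2 ** idxs.count(d) for d in range(rank)]
-- ===== Notes on version B (the rewrite author's own statement) =====
-- stated objective: alternative
-- what changed: B is a staged-pass pipeline: it first maps every basis to its first-nonzero index (found by filtering the nonzero values and locating the first one with list.index), then materialises the effective index list (filter out Nones, or forward-fill them after the assert), and finally builds the output as [2**idxs.count(d) for d in range(rank)] - a per-dimension counting scan instead of A's single loop doubling entries of a preallocated result in place.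
import Mathlib
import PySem

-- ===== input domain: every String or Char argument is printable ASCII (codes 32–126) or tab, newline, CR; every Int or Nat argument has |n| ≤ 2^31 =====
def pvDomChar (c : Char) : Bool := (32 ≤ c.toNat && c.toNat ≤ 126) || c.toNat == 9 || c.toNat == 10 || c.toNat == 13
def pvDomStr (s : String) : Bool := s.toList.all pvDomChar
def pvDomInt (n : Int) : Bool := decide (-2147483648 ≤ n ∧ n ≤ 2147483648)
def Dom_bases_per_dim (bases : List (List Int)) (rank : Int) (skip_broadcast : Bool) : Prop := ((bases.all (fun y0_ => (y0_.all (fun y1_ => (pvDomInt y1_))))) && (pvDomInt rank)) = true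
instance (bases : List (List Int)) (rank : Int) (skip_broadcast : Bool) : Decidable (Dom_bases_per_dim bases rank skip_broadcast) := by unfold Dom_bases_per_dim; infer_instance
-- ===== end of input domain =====

-- B is a staged-pass pipeline (first-nonzero indices via filter+list.index, then the
-- effective index list, then [2**count(d) for d in range(rank)]) replacing A's single
-- loop that doubles entries of a preallocated result in place; alternative decomposition,
-- return-value equivalence on Pre_ (neither program mutates its arguments).

-- ===== PORT A =====
-- next((i for i, v in enumerate(basis) if v != 0), None)
def pvFirstNZ : List Int → Option Nat
  | [] => none
  | v :: rest => if v ≠ 0 then some 0 else (pvFirstNZ rest).map (· + 1)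

-- loop body of A: state = (result, non_zero_idx)
def pvStepA (skip_broadcast : Bool) (st : List Int × Option Nat) (basis : List Int) :
    List Int × Option Nat :=
  match pvFirstNZ basis with
  | some idx => (st.1.set idx (st.1.getD idx 0 * 2), some idx)
  | none =>
    if skip_broadcast then st
    else
      match st.2 with
      | some j => (st.1.set j (st.1.getD j 0 * 2), st.2)
      | none => st  -- Python: assert fails (AssertionError); excluded by Pre_

def bases_per_dim (bases : List (List Int)) (rank : Int) (skip_broadcast : Bool) : List Int :=
  let result := List.replicate rank.toNat 1
  if bases.isEmpty then result
  else (bases.foldl (pvStepA skip_broadcast) (result, none)).1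

-- ===== PORT B =====
-- nz = [v for v in basis if v != 0]; basis.index(nz[0]) if nz else None
def pvFirstNzB (basis : List Int) : Option Nat :=
  let nz := basis.filter (fun v => v != 0)
  if nz.isEmpty then none
  else some ((PySem.List.index? basis (nz.headD 0)).getD 0)  -- nz[0] ∈ basis, so index? is some

-- idxs.append(f if f is not None else idxs[-1])
def pvFill (st : List Nat) (f : Option Nat) : List Nat :=
  match f with
  | some i => st ++ [i]
  | none => st ++ [st.getLastD 0]  -- idxs[-1]; empty only when Python's assert fired (outside Pre_)

def bases_per_dim_alt (bases : List (List Int)) (rank : Int) (skip_broadcast : Bool) : List Int :=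
  let firsts := bases.map pvFirstNzB
  let idxs : List Nat :=
    if skip_broadcast then firsts.filterMap id
    else firsts.foldl pvFill []  -- in Python preceded by the assert (its failure is outside Pre_)
  (List.range rank.toNat).map (fun d => (2 : Int) ^ (idxs.count d))

-- ===== PRECONDITION & SPEC =====
-- Pre_ excludes exactly the inputs where the Python A raises: a basis whose first
-- non-zero index is ≥ rank (IndexError), and, with skip_broadcast=False, a leading
-- all-zero basis (AssertionError).
def Pre_bases_per_dim (bases : List (List Int)) (rank : Int) (skip_broadcast : Bool) : Prop :=
  (∀ b ∈ bases, b.any (· ≠ 0) = true → ((b.findIdx (· ≠ 0) : Int) < rank)) ∧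
  (skip_broadcast = false → bases ≠ [] → (bases.headD []).any (· ≠ 0) = true)
instance (bases : List (List Int)) (rank : Int) (skip_broadcast : Bool) : Decidable (Pre_bases_per_dim bases rank skip_broadcast) := by unfold Pre_bases_per_dim; infer_instance

def pvWitness_bases_per_dim : List (List Int) × Int × Bool := ([[1, 0], [0, 1], [0, 0]], 2, true)

def Spec_bases_per_dim (bases : List (List Int)) (rank : Int) (skip_broadcast : Bool) (out : List Int) : Prop := out = bases_per_dim_alt bases rank skip_broadcast
instance (bases : List (List Int)) (rank : Int) (skip_broadcast : Bool) (out : List Int) : Decidable (Spec_bases_per_dim bases rank skip_broadcast out) := by unfold Spec_bases_per_dim; infer_instance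

-- ===== CLAIM =====
def Claim_equal_bases_per_dim : Prop := ∀ (bases : List (List Int)) (rank : Int) (skip_broadcast : Bool), Dom_bases_per_dim bases rank skip_broadcast → Pre_bases_per_dim bases rank skip_broadcast → Spec_bases_per_dim bases rank skip_broadcast (bases_per_dim bases rank skip_broadcast)
-- ===== LEMMAS AND PROOFS =====

-- the effective index sequence both programs distribute their doublings over
def pvEff (skip : Bool) : List (Option Nat) → Option Nat → List Nat
  | [], _ => []
  | some i :: rest, _ => i :: pvEff skip rest (some i)
  | none :: rest, o =>
    if skip then pvEff skip rest o
    else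
      match o with
      | some j => j :: pvEff skip rest (some j)
      | none => pvEff skip rest none

-- pvFirstNZ in terms of the closed-form any/findIdx used by Pre_
lemma pv_firstNZ_eq (b : List Int) :
    pvFirstNZ b = if b.any (· ≠ 0) then some (b.findIdx (· ≠ 0)) else none := by
  induction b with
  | nil => rfl
  | cons v rest ih =>
    by_cases hv : v ≠ 0
    · simp [pvFirstNZ, hv, List.findIdx_cons]
    · have hv0 : v = 0 := by simpa using hv
      subst hv0
      simp only [pvFirstNZ, if_neg (by simp : ¬((0 : Int) ≠ 0)), ih, List.any_cons,
        List.findIdx_cons]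
      by_cases h : rest.any (· ≠ 0) = true <;> simp [h]
      

-- the head of the nonzero filter is nonzero
lemma pv_headD_filter_ne (l : List Int) (h : l.filter (fun v => v != 0) ≠ []) :
    (l.filter (fun v => v != 0)).headD 0 ≠ 0 := by
  cases hf : l.filter (fun v => v != 0) with
  | nil => exact absurd hf h
  | cons x xs =>
    have hx : x ∈ l.filter (fun v => v != 0) := hf ▸ List.mem_cons_self
    have := List.of_mem_filter hx
    simpa using this

-- B's filter+index first-nonzero equals A's generator scan
lemma pv_firstNzB_eq (b : List Int) : pvFirstNzB b = pvFirstNZ b := by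
  induction b with
  | nil => rfl
  | cons v rest ih =>
    by_cases hv : v = 0
    · subst hv
      have hfeq : (0 :: rest).filter (fun v => v != 0) = rest.filter (fun v => v != 0) := by
        simp
      by_cases hemp : rest.filter (fun v => v != 0) = []
      · have hA : pvFirstNZ rest = none := by
          rw [← ih]; simp only [pvFirstNzB, hemp, List.isEmpty_nil, if_true]
        simp only [pvFirstNzB, hfeq, hemp, List.isEmpty_nil, if_true]
        simp [pvFirstNZ, hA]
      · have hemp' : (rest.filter (fun v => v != 0)).isEmpty = false := by
          simpa [List.isEmpty_iff] using hemp
        set w := (rest.filter (fun v => v != 0)).headD 0 with hw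
        have hwne : w ≠ 0 := pv_headD_filter_ne rest hemp
        have hwmem : w ∈ rest := by
          have hmemf : w ∈ rest.filter (fun v => v != 0) := by
            cases hf : rest.filter (fun v => v != 0) with
            | nil => exact absurd hf hemp
            | cons x xs => simp [hw, hf]
          exact List.mem_of_mem_filter hmemf
        obtain ⟨k, hk⟩ := Option.isSome_iff_exists.1
          ((PySem.List.index?_isSome_iff rest w).2 hwmem)
        have hA : pvFirstNZ rest = some k := by
          rw [← ih]
          simp only [pvFirstNzB, hemp', Bool.false_eq_true, if_false, ← hw, hk]
          rfl
        have hidx : PySem.List.index? (0 :: rest) w = some (k + 1) := by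
          rw [PySem.List.index?_cons_of_ne rest (fun h => hwne h.symm), hk]; rfl
        simp only [pvFirstNzB, hfeq, hemp', Bool.false_eq_true, if_false, ← hw, hidx]
        simp [pvFirstNZ, hA]
    · have hfeq : (v :: rest).filter (fun x => x != 0) = v :: rest.filter (fun x => x != 0) := by
        simp [hv]
      have hidx := PySem.List.index?_cons_self v rest
      simp only [pvFirstNzB, hfeq, List.isEmpty_cons, Bool.false_eq_true, if_false,
        List.headD_cons, hidx]
      simp [pvFirstNZ, hv]

-- unfolding equations for pvEff
lemma pvEff_some (skip : Bool) (l : List (Option Nat)) (i : Nat) (o : Option Nat) :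
    pvEff skip (some i :: l) o = i :: pvEff skip l (some i) := rfl
lemma pvEff_true_none (l : List (Option Nat)) (o : Option Nat) :
    pvEff true (none :: l) o = pvEff true l o := rfl
lemma pvEff_false_none_some (l : List (Option Nat)) (j : Nat) :
    pvEff false (none :: l) (some j) = j :: pvEff false l (some j) := rfl
lemma pvEff_false_none_none (l : List (Option Nat)) :
    pvEff false (none :: l) none = pvEff false l none := rfl

-- the j-th element of the 2^c rendering
lemma pv_map_range_getD {n j : Nat} (hj : j < n) (f : Nat → Int) :
    ((List.range n).map f).getD j 0 = f j := by
  rw [List.getD_eq_getElem?_getD]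
  simp [hj]

-- doubling entry j of the rendering = rendering of the counter bumped at j
lemma pv_double (n j : Nat) (hj : j < n) (c : Nat → Nat) :
    ((List.range n).map (fun i => (2 : Int) ^ c i)).set j
        (((List.range n).map (fun i => (2 : Int) ^ c i)).getD j 0 * 2)
      = (List.range n).map (fun i => (2 : Int) ^ (if i = j then c i + 1 else c i)) := by
  rw [pv_map_range_getD hj]
  apply List.ext_getElem
  · simp
  · intro i h1 h2
    have hi : i < n := by simpa using h2
    by_cases hij : i = j
    · subst hij
      simp [pow_succ]
    · have hji : j ≠ i := fun h => hij h.symm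
      simp [hji, hij]

-- loop invariant: A's result list renders c plus the counts of the effective sequence
lemma pv_loop (skip : Bool) (n : Nat) :
    ∀ (l : List (List Int)) (c : Nat → Nat) (o : Option Nat),
      (∀ b ∈ l, ∀ i, pvFirstNZ b = some i → i < n) →
      (∀ j, o = some j → j < n) →
      (l.foldl (pvStepA skip) ((List.range n).map (fun i => (2 : Int) ^ c i), o)).1
        = (List.range n).map
            (fun i => (2 : Int) ^ (c i + (pvEff skip (l.map pvFirstNZ) o).count i)) := by
  intro l
  induction l with
  | nil => intro c o _ _; simp [pvEff]
  | cons b rest ih =>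
    intro c o hb ho
    have hrest : ∀ b' ∈ rest, ∀ i, pvFirstNZ b' = some i → i < n := by
      intro b' hb' i hi; exact hb b' (by simp [hb']) i hi
    simp only [List.foldl_cons, List.map_cons]
    cases hnz : pvFirstNZ b with
    | some idx =>
      have hidx : idx < n := hb b (by simp) idx hnz
      simp only [pvStepA, hnz]
      rw [pv_double n idx hidx c]
      rw [ih _ (some idx) hrest (by intro j hj; injection hj with h; omega)]
      apply List.map_congr_left
      intro i _
      congr 1
      rw [pvEff_some, List.count_cons]
      by_cases hij : i = idx
      · subst hij
        simp only [beq_self_eq_true, if_true]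
        omega
      · have hji : idx ≠ i := fun h => hij h.symm
        simp [hij, hji]
    | none =>
      simp only [pvStepA, hnz]
      by_cases hs : skip = true
      · subst hs
        rw [if_pos rfl]
        rw [ih c o hrest ho]
        simp only [pvEff_true_none]
      · have hs' : skip = false := by simpa using hs
        subst hs'
        rw [if_neg (by simp)]
        cases hco : o with
        | none =>
          rw [ih c none hrest (by simp)]
          simp only [pvEff_false_none_none]
        | some j =>
          have hj : j < n := ho j hco
          show (rest.foldl (pvStepA false)
              (((List.range n).map (fun i => (2 : Int) ^ c i)).set j
                (((List.range n).map (fun i => (2 : Int) ^ c i)).getD j 0 * 2), some j)).1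
            = _
          rw [pv_double n j hj c]
          rw [ih _ (some j) hrest (by intro j' hj'; injection hj' with h; omega)]
          apply List.map_congr_left
          intro i _
          congr 1
          rw [pvEff_false_none_some, List.count_cons]
          by_cases hij : i = j
          · subst hij
            simp only [beq_self_eq_true, if_true]
            omega
          · have hji : j ≠ i := fun h => hij h.symm
            simp [hij, hji]

-- with skip_broadcast=True the effective sequence is the None-filter
lemma pv_eff_true (fs : List (Option Nat)) : ∀ o, pvEff true fs o = fs.filterMap id := by
  induction fs with
  | nil => intro o; rfl
  | cons f rest ih =>
    intro o
    cases f with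
    | some i => simp [pvEff, ih]
    | none => simp [pvEff, ih]

-- B's forward-fill fold produces the effective sequence (skip_broadcast=False)
lemma pv_fill (fs : List (Option Nat)) :
    ∀ (L : List Nat) (j : Nat), L.getLast? = some j →
      fs.foldl pvFill L = L ++ pvEff false fs (some j) := by
  induction fs with
  | nil => intro L j _; simp [pvEff]
  | cons f rest ih =>
    intro L j hL
    cases f with
    | some i =>
      have : (L ++ [i]).getLast? = some i := by simp
      simp only [List.foldl_cons, pvFill]
      rw [ih (L ++ [i]) i this]
      simp [pvEff]
    | none =>
      have hlast : L.getLastD 0 = j := by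
        rw [List.getLastD_eq_getLast?, hL]; rfl
      have : (L ++ [j]).getLast? = some j := by simp
      simp only [List.foldl_cons, pvFill, hlast]
      rw [ih (L ++ [j]) j this]
      simp [pvEff]

lemma pv_replicate (n : Nat) :
    List.replicate n (1 : Int) = (List.range n).map (fun i => (2 : Int) ^ (0 : Nat)) := by
  simp [List.map_const']

-- ===== VERDICT =====
theorem bases_per_dim_spec : Claim_equal_bases_per_dim := by
  intro bases rank skip _ hpre
  unfold Spec_bases_per_dim bases_per_dim bases_per_dim_alt
  by_cases hemp : bases = []
  · subst hemp; simp [pvEff]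
  · have hne : bases.isEmpty = false := by simpa using hemp
    simp only [hne, Bool.false_eq_true, if_false]
    have hb : ∀ b ∈ bases, ∀ i, pvFirstNZ b = some i → i < rank.toNat := by
      intro b hbm i hi
      rw [pv_firstNZ_eq] at hi
      by_cases hany : b.any (· ≠ 0) = true
      · rw [if_pos hany] at hi
        injection hi with h
        have := hpre.1 b hbm hany
        omega
      · rw [if_neg hany] at hi; exact absurd hi (by simp)
    rw [pv_replicate rank.toNat]
    rw [pv_loop skip rank.toNat bases (fun _ => 0) none hb (by simp)]
    have hmap : bases.map pvFirstNzB = bases.map pvFirstNZ :=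
      List.map_congr_left (fun b _ => pv_firstNzB_eq b)
    rw [hmap]
    cases skip with
    | true =>
      rw [if_pos rfl, ← pv_eff_true (bases.map pvFirstNZ) none]
      simp
    | false =>
      rw [if_neg (by simp)]
      obtain ⟨b0, rest, rfl⟩ : ∃ b0 rest, bases = b0 :: rest := by
        cases bases with
        | nil => exact absurd rfl hemp
        | cons b0 rest => exact ⟨b0, rest, rfl⟩
      have hany : b0.any (· ≠ 0) = true := hpre.2 rfl (by simp)
      have h0 : pvFirstNZ b0 = some (b0.findIdx (· ≠ 0)) := by
        rw [pv_firstNZ_eq, if_pos hany]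
      simp only [List.map_cons, h0, List.foldl_cons, pvFill, List.nil_append]
      rw [pv_fill (rest.map pvFirstNZ) [b0.findIdx (· ≠ 0)] (b0.findIdx (· ≠ 0)) (by simp)]
      simp [pvEff]
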